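-- pv_equiv track=rewrite | github.com/vamshi0997/CSPP-1-assignments | m15/poker/poker.py | get_highcardvalue
-- ===== SOURCE A (Python) =====
-- def hand_to_nos(hand):
--     """ returns list of numbers from the string hand"""
--     nos_ = []
--     fc_ = ('T', 'J', 'Q', 'K', 'A')
--     num_ = None
--     for i in hand:
--         try:
--             num_ = int(i[0])
--         except ValueError:
--             num_ = 10 + fc_.index(i[0])
--         finally:
--             nos_.append(num_)
--     return nos_
--
-- def get_highcardvalue(hand, hand_rank_):
--     """ returns the kicker based on its rank"""
--     nos_ = hand_to_nos(hand)
--     if hand_rank_ in (0, 8):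
--         return max(nos_)
--     max_freq = 0
--     max_freq_element = 0
--     for i in nos_:
--         tmp_ = nos_.count(i)
--         if tmp_ > max_freq:
--             max_freq = tmp_
--             max_freq_element = i
--     return max_freq_element
-- ===== SOURCE B (Python) =====
-- FACE = {'T': 10, 'J': 11, 'Q': 12, 'K': 13, 'A': 14}
--
--
-- def _card_value(card):
--     first = card[0]
--     return FACE[first] if first in FACE else int(first)
--
--
-- def get_highcardvalue(hand, hand_rank_):
--     """ returns the kicker based on its rank"""
--     nos_ = [_card_value(card) for card in hand]
--     if hand_rank_ in (0, 8):
--         return max(nos_)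
--     # One backward pass with incremental suffix counts: when scanning right to
--     # left, a value's running count reaches its full count exactly at its first
--     # (leftmost) occurrence, so updating on `>=` yields the first value of
--     # maximal frequency in left-to-right order -- the same answer as a full
--     # count, without ever recounting the list.
--     best_count = 0
--     best = 0
--     counts = {}
--     for value in reversed(nos_):
--         c = counts.get(value, 0) + 1
--         counts[value] = c
--         if c >= best_count:
--             best_count = c
--             best = value
--     return best
-- ===== Notes on version B (the rewrite author's own statement) =====
-- stated objective: faster
-- what changed: B replaces A's quadratic loop (recounting the whole list with nos_.count at every element while tracking a strict-> running maximum) with a single backward pass that keeps incremental suffix counts in a dict and updates the best on >=; since a value's running count reaches its full count exactly at its leftmost occurrence, this returns the first-occurring mode without ever computing a full count, and cards are converted via a face-value dict instead of try/except with tuple.index.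
import Mathlib
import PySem

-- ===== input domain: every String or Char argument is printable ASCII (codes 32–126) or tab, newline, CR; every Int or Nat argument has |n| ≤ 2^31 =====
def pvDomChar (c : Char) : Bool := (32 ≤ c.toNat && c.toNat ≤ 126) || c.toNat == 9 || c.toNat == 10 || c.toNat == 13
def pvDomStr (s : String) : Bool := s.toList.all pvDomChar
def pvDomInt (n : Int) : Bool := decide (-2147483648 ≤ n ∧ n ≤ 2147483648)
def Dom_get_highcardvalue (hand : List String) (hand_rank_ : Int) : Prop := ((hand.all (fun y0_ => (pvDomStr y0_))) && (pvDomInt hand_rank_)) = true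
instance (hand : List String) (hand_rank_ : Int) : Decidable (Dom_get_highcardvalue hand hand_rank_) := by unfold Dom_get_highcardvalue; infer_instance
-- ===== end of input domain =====

-- B replaces A's quadratic recount-inside-the-loop scan with a single backward
-- pass keeping incremental suffix counts and updating the best on >=
-- (objective: faster, asymptotic). Return-value equivalence is proved on Pre_:
-- well-formed cards, and a nonempty hand when hand_rank_ is 0 or 8.

-- ===== PORT A =====
def fc_ : List String := ["T", "J", "Q", "K", "A"]

-- i[0] on an empty card is an IndexError, and fc_.index raises ValueError for a
-- first char that is neither a digit nor a face letter; both are excluded by Pre_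
-- (the port returns a junk default there).
def hand_to_nos (hand : List String) : List Int :=
  hand.foldl (fun nos_ i =>
    nos_ ++ [match PySem.Str.pyGet? i 0 with
      | none => 0
      | some c =>
        match PySem.Int.ofStr? (String.mk [c]) with
        | some n => n
        | none => 10 + (((PySem.List.index? fc_ (String.mk [c])).getD 0 : Nat) : Int)]) []

def get_highcardvalue (hand : List String) (hand_rank_ : Int) : Int :=
  let nos_ := hand_to_nos hand
  if hand_rank_ = 0 ∨ hand_rank_ = 8 then
    -- max([]) is a ValueError, excluded by Pre_
    (PySem.List.max? nos_ (fun x => x)).getD 0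
  else
    let r := nos_.foldl (fun (s : Int × Int) i =>
      let tmp_ : Int := ((PySem.List.count nos_ i : Nat) : Int)
      if tmp_ > s.1 then (tmp_, i) else s) (0, 0)
    r.2

-- ===== PORT B =====
def pvFace : PySem.Dict String Int :=
  PySem.Dict.ofList [("T", 10), ("J", 11), ("Q", 12), ("K", 13), ("A", 14)]

-- card[0] on an empty card raises, and int(card[0]) raises for a non-digit
-- non-face first char; both excluded by Pre_ (junk default here).
def pvCardValue (card : String) : Int :=
  match PySem.Str.pyGet? card 0 with
  | none => 0
  | some first =>
    match pvFace.get? (String.mk [first]) with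
    | some v => v
    | none => (PySem.Int.ofStr? (String.mk [first])).getD 0

def get_highcardvalue_alt (hand : List String) (hand_rank_ : Int) : Int :=
  let nos_ := hand.map pvCardValue
  if hand_rank_ = 0 ∨ hand_rank_ = 8 then
    -- max([]) is a ValueError, excluded by Pre_
    (PySem.List.max? nos_ (fun x => x)).getD 0
  else
    -- state = (counts, best_count, best); 'for value in reversed(nos_)'
    let s := nos_.reverse.foldl
      (fun (s : PySem.Dict Int Int × Int × Int) value =>
        let c := s.1.getD value 0 + 1
        let counts := s.1.insert value c
        if c ≥ s.2.1 then (counts, c, value) else (counts, s.2.1, s.2.2))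
      (PySem.Dict.empty, 0, 0)
    s.2.2

-- ===== PRECONDITION & SPEC =====
-- A card is valid when its first character is a digit or a face letter.
def pvValidCard (s : String) : Bool :=
  match PySem.Str.pyGet? s 0 with
  | none => false
  | some c => c ∈ ['0', '1', '2', '3', '4', '5', '6', '7', '8', '9', 'T', 'J', 'Q', 'K', 'A']

-- Pre_ excludes exactly the inputs where the Python A raises: a card that is
-- empty or whose first char is neither a digit nor in TJQKA (ValueError /
-- IndexError), and an empty hand with hand_rank_ 0 or 8 (max of empty sequence).
def Pre_get_highcardvalue (hand : List String) (hand_rank_ : Int) : Prop :=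
  (∀ s ∈ hand, pvValidCard s = true) ∧ ((hand_rank_ = 0 ∨ hand_rank_ = 8) → hand ≠ [])
instance (hand : List String) (hand_rank_ : Int) : Decidable (Pre_get_highcardvalue hand hand_rank_) := by
  unfold Pre_get_highcardvalue; infer_instance

def pvWitness_get_highcardvalue : List String × Int := (["AS", "KD", "3C", "3H"], 2)

def Spec_get_highcardvalue (hand : List String) (hand_rank_ : Int) (out : Int) : Prop := out = get_highcardvalue_alt hand hand_rank_
instance (hand : List String) (hand_rank_ : Int) (out : Int) : Decidable (Spec_get_highcardvalue hand hand_rank_ out) := by unfold Spec_get_highcardvalue; infer_instance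

-- ===== CLAIM (what is proved, stated in full; the proofs are below) =====
def Claim_equal_get_highcardvalue : Prop := ∀ (hand : List String) (hand_rank_ : Int), Dom_get_highcardvalue hand hand_rank_ → Pre_get_highcardvalue hand hand_rank_ → Spec_get_highcardvalue hand hand_rank_ (get_highcardvalue hand hand_rank_)

-- ===== LEMMAS AND PROOFS =====

-- the value A computes for one card (A's loop body, per element)
def pvAVal (i : String) : Int :=
  match PySem.Str.pyGet? i 0 with
  | none => 0
  | some c =>
    match PySem.Int.ofStr? (String.mk [c]) with
    | some n => n
    | none => 10 + (((PySem.List.index? fc_ (String.mk [c])).getD 0 : Nat) : Int)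

theorem hand_to_nos_eq_map (hand : List String) : hand_to_nos hand = hand.map pvAVal := by
  simpa [hand_to_nos, pvAVal] using
    PySem.List.foldl_append_singleton_eq_map pvAVal hand []

theorem card_value_eq (s : String) (hs : pvValidCard s = true) : pvAVal s = pvCardValue s := by
  unfold pvValidCard at hs
  unfold pvAVal pvCardValue
  simp only [PySem.Str.pyGet?, PySem.Chars.pyGet?] at hs ⊢
  cases h : PySem.List.pyGet? s.toList 0 with
  | none => simp [h] at hs
  | some c =>
    rw [h] at hs
    simp only [List.mem_cons, List.not_mem_nil, or_false, decide_eq_true_eq] at hs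
    rcases hs with h1|h1|h1|h1|h1|h1|h1|h1|h1|h1|h1|h1|h1|h1|h1 <;> subst h1 <;> decide

-- max of a list of Nats, 0 for []
def pvFmax (l : List Nat) : Nat := l.foldr max 0

theorem pvFmax_le_iff (l : List Nat) (n : Nat) : pvFmax l ≤ n ↔ ∀ x ∈ l, x ≤ n := by
  induction l with
  | nil => simp [pvFmax]
  | cons x xs ih => simp [pvFmax] at ih ⊢; tauto

theorem pvLe_fmax (l : List Nat) (x : Nat) (hx : x ∈ l) : x ≤ pvFmax l :=
  (pvFmax_le_iff l (pvFmax l)).mp le_rfl x hx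

theorem pvFmax_mem (l : List Nat) (hl : l ≠ []) : pvFmax l ∈ l := by
  induction l with
  | nil => exact absurd rfl hl
  | cons x xs ih =>
    cases xs with
    | nil => simp [pvFmax]
    | cons y ys =>
      have hcons : pvFmax (x :: y :: ys) = max x (pvFmax (y :: ys)) := rfl
      rcases Nat.le_total (pvFmax (y :: ys)) x with h | h
      · rw [hcons, Nat.max_eq_left h]
        exact List.mem_cons_self
      · rw [hcons, Nat.max_eq_right h]
        exact List.mem_cons_of_mem x (ih (by simp))

theorem pvFmax_base (l : List Nat) (c : Nat) : l.foldr max c = max (pvFmax l) c := by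
  induction l with
  | nil => simp [pvFmax]
  | cons x xs ih =>
    show max x (xs.foldr max c) = max (max x (pvFmax xs)) c
    rw [ih, Nat.max_assoc]

theorem pvFmax_append (a b : List Nat) : pvFmax (a ++ b) = max (pvFmax a) (pvFmax b) := by
  unfold pvFmax
  rw [List.foldr_append, pvFmax_base]
  rfl

-- max count over prefix p, counts taken in the full list L
def pvPM (L p : List Int) : Nat := pvFmax (p.map (fun x => L.count x))
-- first element of p whose count in L equals that max (0 if none)
def pvPC (L p : List Int) : Int := (p.find? (fun x => L.count x == pvPM L p)).getD 0

-- true max frequency and first-occurring mode of l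
def pvMt (l : List Int) : Nat := pvPM l l
def pvCanon (l : List Int) : Int := pvPC l l

-- A's running-(max_freq, element) loop computes (max count, first mode)
theorem pvAfold (L p : List Int) (hp : ∀ i ∈ p, 1 ≤ L.count i) :
    p.foldl (fun (s : Int × Int) i =>
        if ((L.count i : Nat) : Int) > s.1 then (((L.count i : Nat) : Int), i) else s) (0, 0)
      = (((pvPM L p : Nat) : Int), pvPC L p) := by
  induction p using List.reverseRecOn with
  | nil => simp [pvPM, pvPC, pvFmax]
  | append_singleton p i ih =>
    have hp' : ∀ j ∈ p, 1 ≤ L.count j := fun j hj => hp j (List.mem_append_left _ hj)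
    have hi : 1 ≤ L.count i := hp i (List.mem_append_right _ (by simp))
    rw [List.foldl_append, ih hp']
    simp only [List.foldl_cons, List.foldl_nil]
    have hPM : pvPM L (p ++ [i]) = max (pvPM L p) (L.count i) := by
      unfold pvPM
      rw [List.map_append, pvFmax_append]
      simp [pvFmax]
    by_cases ht : pvPM L p < L.count i
    · have hgt : (((L.count i : Nat) : Int)) > ((pvPM L p : Nat) : Int) := by exact_mod_cast ht
      rw [if_pos hgt]
      have hPMi : pvPM L (p ++ [i]) = L.count i := by
        rw [hPM]; exact Nat.max_eq_right (Nat.le_of_lt ht)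
      have hnone : p.find? (fun x => L.count x == pvPM L (p ++ [i])) = none := by
        rw [List.find?_eq_none]
        intro x hx
        have : L.count x ≤ pvPM L p :=
          pvLe_fmax _ _ (List.mem_map.mpr ⟨x, hx, rfl⟩)
        simp [hPMi]; omega
      have : pvPC L (p ++ [i]) = i := by
        unfold pvPC
        rw [List.find?_append, hnone]
        simp [hPMi]
      rw [this, hPMi]
    · have hle : L.count i ≤ pvPM L p := Nat.le_of_not_lt ht
      have hngt : ¬ (((L.count i : Nat) : Int) > ((pvPM L p : Nat) : Int)) := by
        simp; exact_mod_cast hle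
      rw [if_neg hngt]
      have hPMe : pvPM L (p ++ [i]) = pvPM L p := by
        rw [hPM]; exact Nat.max_eq_left hle
      have hpne : p ≠ [] := by
        intro h; subst h
        simp [pvPM, pvFmax] at hle
        omega
      -- the max over p is attained, so find? over p succeeds
      have hmem : pvPM L p ∈ p.map (fun x => L.count x) :=
        pvFmax_mem _ (by simpa using hpne)
      obtain ⟨y, hy, hyc⟩ := List.mem_map.mp hmem
      have hsome : (p.find? (fun x => L.count x == pvPM L p)).isSome := by
        rw [List.find?_isSome]
        exact ⟨y, hy, by simp [hyc]⟩
      obtain ⟨a, ha⟩ := Option.isSome_iff_exists.mp hsome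
      have : pvPC L (p ++ [i]) = pvPC L p := by
        unfold pvPC
        rw [hPMe, List.find?_append, ha]
        rfl
      rw [this, hPMe]

theorem pvFind?_congr {α : Type} (l : List α) (p q : α → Bool)
    (h : ∀ x ∈ l, p x = q x) : l.find? p = l.find? q := by
  induction l with
  | nil => rfl
  | cons x xs ih =>
    simp only [List.find?_cons]
    rw [h x (by simp)]
    cases q x
    · exact ih (fun y hy => h y (List.mem_cons_of_mem x hy))
    · rfl

theorem pvMt_cons (x : Int) (xs : List Int) :
    pvMt (x :: xs) = max ((x :: xs).count x) (pvMt xs) := by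
  have hcount : ∀ y, (x :: xs).count y = xs.count y + if y = x then 1 else 0 := by
    intro y
    rw [List.count_cons]
    by_cases h : y = x
    · subst h; simp
    · have hb : (x == y) = false := by simp [Ne.symm h]
      simp [hb, h]
  simp only [pvMt, pvPM]
  apply Nat.le_antisymm
  · rw [pvFmax_le_iff]
    intro v hv
    obtain ⟨y, hy, rfl⟩ := List.mem_map.mp hv
    rcases List.mem_cons.mp hy with rfl | hy'
    · exact Nat.le_max_left _ _
    · by_cases hxy : y = x
      · subst hxy
        exact Nat.le_max_left _ _
      · rw [hcount y, if_neg hxy, Nat.add_zero]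
        exact le_trans (pvLe_fmax _ _ (List.mem_map.mpr ⟨y, hy', rfl⟩)) (Nat.le_max_right _ _)
  · rw [Nat.max_le]
    constructor
    · exact pvLe_fmax _ _ (List.mem_map.mpr ⟨x, by simp, rfl⟩)
    · rw [pvFmax_le_iff]
      intro v hv
      obtain ⟨y, hy, rfl⟩ := List.mem_map.mp hv
      have h1 : xs.count y ≤ (x :: xs).count y := by rw [hcount]; omega
      exact le_trans h1 (pvLe_fmax _ _ (List.mem_map.mpr ⟨y, List.mem_cons_of_mem x hy, rfl⟩))

-- B's loop, named for the proofs (definitionally the fold in get_highcardvalue_alt)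
def pvB (l : List Int) : PySem.Dict Int Int × Int × Int :=
  l.reverse.foldl
    (fun (s : PySem.Dict Int Int × Int × Int) value =>
      let c := s.1.getD value 0 + 1
      let counts := s.1.insert value c
      if c ≥ s.2.1 then (counts, c, value) else (counts, s.2.1, s.2.2))
    (PySem.Dict.empty, 0, 0)

-- the backward pass: counts become the full counts, best the (max count, first mode)
theorem pvBfold (l : List Int) :
    (∀ v, (pvB l).1.getD v 0 = (l.count v : Int)) ∧
      (pvB l).2.1 = ((pvMt l : Nat) : Int) ∧ (pvB l).2.2 = pvCanon l := by
  induction l with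
  | nil =>
    refine ⟨fun v => by simp [pvB, PySem.Dict.getD_empty], ?_, ?_⟩ <;>
      simp [pvB, pvMt, pvPM, pvCanon, pvPC, pvFmax]
  | cons x xs ih =>
    obtain ⟨ihd, ihm, ihe⟩ := ih
    have hstep : pvB (x :: xs) =
        (let c := (pvB xs).1.getD x 0 + 1
         let counts := (pvB xs).1.insert x c
         if c ≥ (pvB xs).2.1 then (counts, c, x) else (counts, (pvB xs).2.1, (pvB xs).2.2)) := by
      unfold pvB
      rw [List.reverse_cons, List.foldl_append]
      simp
    have hc : (pvB xs).1.getD x 0 + 1 = (((x :: xs).count x : Nat) : Int) := by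
      rw [ihd x]
      have h1 : (x :: xs).count x = xs.count x + 1 := by
        rw [List.count_cons]; simp
      rw [h1]; push_cast; ring
    have hcnt : ∀ y, (x :: xs).count y = xs.count y + if y = x then 1 else 0 := by
      intro y
      rw [List.count_cons]
      by_cases h : y = x
      · subst h; simp
      · have hb : (x == y) = false := by simp [Ne.symm h]
        simp [hb, h]
    have hdict : ∀ v, ((pvB xs).1.insert x ((pvB xs).1.getD x 0 + 1)).getD v 0
        = ((x :: xs).count v : Int) := by
      intro v
      rw [PySem.Dict.getD_insert]
      by_cases hv : v = x
      · rw [if_pos hv, hv, hc]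
      · rw [if_neg hv, ihd v, hcnt v, if_neg hv]
        simp
    by_cases hge : pvMt xs ≤ (x :: xs).count x
    · have hcond : ((pvB xs).1.getD x 0 + 1) ≥ (pvB xs).2.1 := by
        rw [hc, ihm]; exact_mod_cast hge
      rw [hstep]; simp only [if_pos hcond]
      have hM : pvMt (x :: xs) = (x :: xs).count x := by
        rw [pvMt_cons]; exact Nat.max_eq_left hge
      refine ⟨hdict, ?_, ?_⟩
      · rw [hc, hM]
      · show x = pvCanon (x :: xs)
        unfold pvCanon pvPC
        rw [List.find?_cons_of_pos (by
          rw [show pvPM (x :: xs) (x :: xs) = (x :: xs).count x from hM]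
          simp)]
        rfl
    · have hlt : (x :: xs).count x < pvMt xs := Nat.lt_of_not_le hge
      have hcond : ¬ (((pvB xs).1.getD x 0 + 1) ≥ (pvB xs).2.1) := by
        rw [hc, ihm]
        intro hcon
        exact absurd (by exact_mod_cast hcon : pvMt xs ≤ (x :: xs).count x) hge
      rw [hstep]; simp only [if_neg hcond]
      have hM : pvMt (x :: xs) = pvMt xs := by
        rw [pvMt_cons]; exact Nat.max_eq_right (Nat.le_of_lt hlt)
      refine ⟨hdict, by rw [ihm, hM], ?_⟩
      rw [ihe]
      show pvCanon xs = pvCanon (x :: xs)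
      unfold pvCanon pvPC
      rw [show pvPM (x :: xs) (x :: xs) = pvMt xs from hM]
      rw [List.find?_cons_of_neg (by
        have h1 : (x :: xs).count x ≠ pvMt xs := Nat.ne_of_lt hlt
        simpa using h1)]
      have hcongr : xs.find? (fun y => (x :: xs).count y == pvMt xs)
          = xs.find? (fun y => xs.count y == pvMt xs) := by
        apply pvFind?_congr
        intro y hy
        by_cases hxy : y = x
        · have h1 : (x :: xs).count y ≠ pvMt xs := by
            rw [hxy]; exact Nat.ne_of_lt hlt
          have h2 : xs.count y ≠ pvMt xs := by
            have h3 := hcnt y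
            rw [if_pos hxy] at h3
            have h5 : (x :: xs).count y < pvMt xs := by
              rw [hxy]; exact hlt
            omega
          have hp : (((x :: xs).count y == pvMt xs)) = false := by simpa using h1
          have hq : ((xs.count y == pvMt xs)) = false := by simpa using h2
          rw [hp, hq]
        · rw [hcnt y, if_neg hxy, Nat.add_zero]
      rw [hcongr]
      rfl

theorem get_highcardvalue_spec' (hand : List String) (hand_rank_ : Int)
    (hpre : Pre_get_highcardvalue hand hand_rank_) :
    get_highcardvalue hand hand_rank_ = get_highcardvalue_alt hand hand_rank_ := by
  obtain ⟨hcards, -⟩ := hpre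
  have hnos : hand_to_nos hand = hand.map pvCardValue := by
    rw [hand_to_nos_eq_map]
    exact List.map_congr_left (fun s hs => card_value_eq s (hcards s hs))
  unfold get_highcardvalue get_highcardvalue_alt
  rw [hnos]
  set nos := hand.map pvCardValue with hnosdef
  by_cases hr : hand_rank_ = 0 ∨ hand_rank_ = 8
  · rw [if_pos hr, if_pos hr]
  · rw [if_neg hr, if_neg hr]
    have hA : nos.foldl (fun (s : Int × Int) i =>
        let tmp_ : Int := ((PySem.List.count nos i : Nat) : Int)
        if tmp_ > s.1 then (tmp_, i) else s) (0, 0)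
        = (((pvPM nos nos : Nat) : Int), pvPC nos nos) := by
      have := pvAfold nos nos (fun i hi => List.count_pos_iff.mpr hi)
      simpa [PySem.List.count_eq] using this
    rw [hA]
    show pvPC nos nos = _
    have := (pvBfold nos).2.2
    rw [show pvCanon nos = pvPC nos nos from rfl] at this
    rw [← this]
    rfl

-- ===== VERDICT (by name: the statement is the Claim_ definition above) =====
theorem get_highcardvalue_spec : Claim_equal_get_highcardvalue := by
  intro hand hand_rank_ _ hpre
  exact get_highcardvalue_spec' hand hand_rank_ hpre
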